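-- pv_equiv track=rewrite | github.com/romek-codes/nexusystem | home/scripts/reh/reh/app.py | format_transcript_text
-- ===== SOURCE A (Python) =====
-- def format_transcript_text(raw: str) -> str:
--     env_end = raw.find("</environment_context>")
--     if env_end != -1:
--         env_block = raw[: env_end + len("</environment_context>")].strip()
--         rest = raw[env_end + len("</environment_context>") :].strip()
--     else:
--         env_block = ""
--         rest = raw.strip()
--
--     # Add 2 empty lines only when speaker changes user <-> assistant.
--     lines = rest.splitlines()
--     out: list[str] = []
--     prev_speaker: str | None = None
--
--     for line in lines:
--         stripped = line.lstrip()
--         speaker = None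
--
--         if stripped.startswith("user>"):
--             speaker = "user"
--         elif stripped.startswith("assistant>"):
--             speaker = "assistant"
--
--         if speaker and prev_speaker and speaker != prev_speaker:
--             while out and out[-1] == "":
--                 out.pop()
--             out.extend(["", ""])
--
--         out.append(line)
--
--         if speaker:
--             prev_speaker = speaker
--
--     normal_transcript = "\n".join(out).strip()
--
--     if env_block:
--         return "\n".join(
--             [
--                 "environment context:",
--                 env_block,
--                 "",
--                 "",
--                 "transcript:",
--                 normal_transcript or "(no transcript text found)",
--             ]
--         )
--
--     return normal_transcript
-- ===== SOURCE B (Python) =====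
-- def _speaker(line):
--     s = line.lstrip()
--     if s.startswith("user>"):
--         return "user"
--     if s.startswith("assistant>"):
--         return "assistant"
--     return None
--
--
-- def _first_block(lines):
--     """Longest prefix with no user<->assistant speaker change; returns (block, rest)."""
--     cur = None
--     for i, line in enumerate(lines):
--         sp = _speaker(line)
--         if sp is not None:
--             if cur is not None and sp != cur:
--                 return lines[:i], lines[i:]
--             cur = sp
--     return lines, []
--
--
-- def _render(lines):
--     """Join blocks with exactly two blank lines; a non-final block loses trailing blanks."""
--     if not lines:
--         return ""
--     block, rest = _first_block(lines)
--     if not rest: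
--         return "\n".join(block)
--     while block and block[-1] == "":
--         block = block[:-1]
--     return "\n".join(block) + "\n\n\n" + _render(rest)
--
--
-- def format_transcript_text(raw: str) -> str:
--     END = "</environment_context>"
--     i = raw.find(END)
--     if i == -1:
--         env_block, rest = "", raw.strip()
--     else:
--         env_block, rest = raw[: i + len(END)].strip(), raw[i + len(END):].strip()
--
--     normal = _render(rest.splitlines()).strip()
--
--     if env_block:
--         return "environment context:\n%s\n\n\ntranscript:\n%s" % (
--             env_block, normal or "(no transcript text found)")
--     return normal
-- ===== Notes on version B (the rewrite author's own statement) =====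
-- stated objective: alternative
-- what changed: Replaces A's single mutating accumulator loop (pop trailing blanks in place, extend a flat output list) with a recursive divide-and-conquer: repeatedly split off the longest speaker-change-free prefix of the lines, trim a non-final block's trailing blank lines, and glue the rendered blocks with a two-blank-line separator; the env wrapping becomes one format string.
import Mathlib
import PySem

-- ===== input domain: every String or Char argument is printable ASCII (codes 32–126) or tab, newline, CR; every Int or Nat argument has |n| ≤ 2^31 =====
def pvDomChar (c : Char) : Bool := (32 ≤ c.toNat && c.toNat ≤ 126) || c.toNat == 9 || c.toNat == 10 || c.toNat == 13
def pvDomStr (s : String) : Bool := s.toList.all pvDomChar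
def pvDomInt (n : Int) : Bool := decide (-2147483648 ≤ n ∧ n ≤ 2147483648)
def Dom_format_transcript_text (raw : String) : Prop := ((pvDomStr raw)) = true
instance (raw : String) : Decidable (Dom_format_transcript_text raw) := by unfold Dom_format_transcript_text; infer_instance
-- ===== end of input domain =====

-- B replaces A's single mutating accumulator loop (pop trailing blanks in place, extend a flat
-- list) with a recursive divide-and-conquer: split off the longest speaker-change-free prefix,
-- trim its trailing blank lines, glue the blocks with a two-blank-line separator; objective: alternative.

-- ===== PORT A =====
-- 'while out and out[-1] == "": out.pop()' — pops exactly the maximal run of trailing "" lines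
def pvPopTrailingEmpty (out : List (List Char)) : List (List Char) :=
  (out.reverse.dropWhile (fun l => l.isEmpty)).reverse

-- one iteration of A's for-loop; state = (out, prev_speaker)
def pvStepA (s : List (List Char) × Option String) (line : List Char) :
    List (List Char) × Option String :=
  let stripped := PySem.Chars.lstrip line
  let speaker : Option String :=
    if PySem.Chars.startswith stripped ("user>".toList) then some "user"
    else if PySem.Chars.startswith stripped ("assistant>".toList) then some "assistant"
    else none
  let out :=
    if speaker.isSome && s.2.isSome && (speaker != s.2) then
      pvPopTrailingEmpty s.1 ++ [[], []]
    else s.1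
  (out ++ [line], if speaker.isSome then speaker else s.2)

def format_transcript_text (raw : String) : String :=
  let rawL := raw.toList
  let envEnd := PySem.Chars.find rawL ("</environment_context>".toList)
  -- len("</environment_context>") = 22
  let envBlock := if envEnd ≠ -1 then PySem.Chars.strip (PySem.Chars.slice rawL none (some (envEnd + 22))) else []
  let rest := if envEnd ≠ -1 then PySem.Chars.strip (PySem.Chars.slice rawL (some (envEnd + 22)) none) else PySem.Chars.strip rawL
  let lines := PySem.Chars.splitlines rest
  let res := lines.foldl pvStepA ([], none)
  let normal := PySem.Chars.strip (PySem.Chars.join ['\n'] res.1)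
  if envBlock ≠ [] then
    String.mk (PySem.Chars.join ['\n']
      [("environment context:".toList), envBlock, [], [], ("transcript:".toList),
       if normal = [] then ("(no transcript text found)".toList) else normal])
  else String.mk normal

-- ===== PORT B =====
-- B's _speaker(line)
def pvSpeakerB (line : List Char) : Option String :=
  let s := PySem.Chars.lstrip line
  if PySem.Chars.startswith s ("user>".toList) then some "user"
  else if PySem.Chars.startswith s ("assistant>".toList) then some "assistant"
  else none

-- B's _first_block: longest prefix with no recognized-speaker change against cur
def pvFirstBlock (cur : Option String) : List (List Char) → List (List Char) × List (List Char)
  | [] => ([], [])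
  | line :: ls =>
    match pvSpeakerB line with
    | some sp =>
      if cur.isSome && ((some sp : Option String) != cur) then ([], line :: ls)
      else
        let r := pvFirstBlock (some sp) ls
        (line :: r.1, r.2)
    | none =>
      let r := pvFirstBlock cur ls
      (line :: r.1, r.2)

-- _first_block returns a split of its input (also gives termination of _render)
theorem pvFirstBlock_split (cur : Option String) (xs : List (List Char)) :
    (pvFirstBlock cur xs).1 ++ (pvFirstBlock cur xs).2 = xs := by
  induction xs generalizing cur with
  | nil => rfl
  | cons line ls ih =>
    simp only [pvFirstBlock]
    cases hsp : pvSpeakerB line with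
    | some sp =>
      by_cases hc : (cur.isSome && ((some sp : Option String) != cur)) = true
      · simp [hc]
      · simp only [Bool.not_eq_true] at hc
        simp [hc, ih (some sp)]
    | none => simp [ih cur]

theorem pvFirstBlock_rest_lt (line : List Char) (ls : List (List Char)) :
    (pvFirstBlock none (line :: ls)).2.length < (line :: ls).length := by
  have hle : ∀ (cur : Option String) (xs : List (List Char)),
      (pvFirstBlock cur xs).2.length ≤ xs.length := by
    intro cur xs
    have := congrArg List.length (pvFirstBlock_split cur xs)
    simp only [List.length_append] at this
    omega
  simp only [pvFirstBlock]
  cases hsp : pvSpeakerB line with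
  | some sp => simpa using Nat.lt_succ_of_le (hle (some sp) ls)
  | none => simpa using Nat.lt_succ_of_le (hle none ls)

-- 'while block and block[-1] == "": block = block[:-1]' — drop the last element while it is ""
def pvTrimB : List (List Char) → List (List Char)
  | [] => []
  | x :: xs =>
    match (x :: xs).getLast? with
    | some [] => pvTrimB (x :: xs).dropLast
    | _ => x :: xs
termination_by b => b.length
decreasing_by simp

-- B's _render: recursively peel off the first block, trim it unless final, glue with "\n\n\n"
def pvRender : List (List Char) → List Char
  | [] => []
  | line :: ls =>
    if (pvFirstBlock none (line :: ls)).2.isEmpty then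
      PySem.Chars.join ['\n'] (pvFirstBlock none (line :: ls)).1
    else
      PySem.Chars.join ['\n'] (pvTrimB (pvFirstBlock none (line :: ls)).1) ++
        ('\n' :: '\n' :: '\n' :: []) ++ pvRender (pvFirstBlock none (line :: ls)).2
termination_by xs => xs.length
decreasing_by exact pvFirstBlock_rest_lt line ls

def format_transcript_text_alt (raw : String) : String :=
  let rawL := raw.toList
  let i := PySem.Chars.find rawL ("</environment_context>".toList)
  let envBlock := if i == -1 then ([] : List Char) else PySem.Chars.strip (PySem.Chars.slice rawL none (some (i + 22)))
  let rest := if i == -1 then PySem.Chars.strip rawL else PySem.Chars.strip (PySem.Chars.slice rawL (some (i + 22)) none)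
  let normal := PySem.Chars.strip (pvRender (PySem.Chars.splitlines rest))
  if envBlock ≠ [] then
    String.mk (("environment context:\n".toList) ++ envBlock ++ ("\n\n\ntranscript:\n".toList) ++
      (if normal = [] then "(no transcript text found)".toList else normal))
  else String.mk normal

-- ===== PRECONDITION & SPEC =====
def Spec_format_transcript_text (raw : String) (out : String) : Prop := out = format_transcript_text_alt raw
instance (raw : String) (out : String) : Decidable (Spec_format_transcript_text raw out) := by unfold Spec_format_transcript_text; infer_instance

-- ===== CLAIM (what is proved, stated in full; the proofs are below) =====
def Claim_equal_format_transcript_text : Prop := ∀ (raw : String), Dom_format_transcript_text raw → Spec_format_transcript_text raw (format_transcript_text raw)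

-- ===== LEMMAS AND PROOFS =====

-- the speaker classified from one line (shared subexpression of both step functions)
def pvSpk (line : List Char) : Option String :=
  if PySem.Chars.startswith (PySem.Chars.lstrip line) ("user>".toList) then some "user"
  else if PySem.Chars.startswith (PySem.Chars.lstrip line) ("assistant>".toList) then some "assistant"
  else none

theorem pvSpk_eq_speakerB (line : List Char) : pvSpk line = pvSpeakerB line := rfl

theorem pvStepA_def (out : List (List Char)) (prev : Option String) (line : List Char) :
    pvStepA (out, prev) line =
      ((if (pvSpk line).isSome && prev.isSome && (pvSpk line != prev) then
          pvPopTrailingEmpty out ++ [[], []] else out) ++ [line],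
       if (pvSpk line).isSome then pvSpk line else prev) := rfl

-- B's while-pop trim computes the reverse-dropWhile form used by the lemmas below
theorem pvTrimB_eq_pop (b : List (List Char)) :
    pvTrimB b = (b.reverse.dropWhile (fun l => l.isEmpty)).reverse := by
  induction b using List.reverseRecOn with
  | nil => simp [pvTrimB]
  | append_singleton c l ih =>
    cases hc : c ++ [l] with
    | nil => simp at hc
    | cons x xs =>
      rw [← hc]
      have hlast : (c ++ [l]).getLast? = some l := by simp
      cases l with
      | nil =>
        have hstep : pvTrimB (c ++ [[]]) = pvTrimB (c ++ [[]]).dropLast := by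
          rw [hc, pvTrimB, ← hc, hlast]
        rw [hstep, List.dropLast_concat, ih]
        simp
      | cons ch cs =>
        have hstep : pvTrimB (c ++ [ch :: cs]) = c ++ [ch :: cs] := by
          rw [hc, pvTrimB, ← hc, hlast]
        rw [hstep]
        simp

-- proof-side intermediate: the block-partition fold of the previous pipeline formulation
def pvStepB (s : List (List (List Char)) × List (List Char) × Option String) (line : List Char) :
    List (List (List Char)) × List (List Char) × Option String :=
  let speaker := pvSpk line
  if speaker.isSome && s.2.2.isSome && (speaker != s.2.2) then
    (s.1 ++ [s.2.1], [line], speaker)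
  else
    (s.1, s.2.1 ++ [line], if speaker.isSome then speaker else s.2.2)

theorem pvStepB_def (done : List (List (List Char))) (cur : List (List Char))
    (prev : Option String) (line : List Char) :
    pvStepB (done, cur, prev) line =
      if (pvSpk line).isSome && prev.isSome && (pvSpk line != prev) then
        (done ++ [cur], [line], pvSpk line)
      else (done, cur ++ [line], if (pvSpk line).isSome then pvSpk line else prev) := rfl

-- A's accumulated out-list, reconstructed from the pipeline's finished blocks
def pvGlue (done : List (List (List Char))) : List (List Char) :=
  (done.map (fun b => pvTrimB b ++ [[], []])).flatten

theorem pvGlue_append_singleton (done : List (List (List Char))) (b : List (List Char)) :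
    pvGlue (done ++ [b]) = pvGlue done ++ (pvTrimB b ++ [[], []]) := by
  simp [pvGlue]

theorem pvTrim_ne_nil (b : List (List Char)) (h : ∃ l ∈ b, l ≠ []) :
    pvTrimB b ≠ [] := by
  obtain ⟨l, hl, hne⟩ := h
  rw [pvTrimB_eq_pop]
  simp only [ne_eq, List.reverse_eq_nil_iff, List.dropWhile_eq_nil_iff]
  intro hall
  exact hne (List.isEmpty_iff.mp (hall l (List.mem_reverse.mpr hl)))

theorem pvPop_append (xs cur : List (List Char)) (h : ∃ l ∈ cur, l ≠ []) :
    pvPopTrailingEmpty (xs ++ cur) = xs ++ pvTrimB cur := by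
  have hne : (cur.reverse.dropWhile (fun l => l.isEmpty)) ≠ [] := by
    obtain ⟨l, hl, hne⟩ := h
    simp only [ne_eq, List.dropWhile_eq_nil_iff]
    intro hall
    exact hne (List.isEmpty_iff.mp (hall l (List.mem_reverse.mpr hl)))
  rw [pvTrimB_eq_pop]
  simp only [pvPopTrailingEmpty, List.reverse_append,
    List.dropWhile_append, List.isEmpty_iff]
  rw [if_neg hne]
  simp

theorem pvSpk_line_ne_nil (line : List Char) (h : (pvSpk line).isSome = true) : line ≠ [] := by
  intro hnil
  subst hnil
  simp [pvSpk, PySem.Chars.lstrip, PySem.Chars.startswith] at h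

-- join distributes over ++ of nonempty part-lists
theorem pvJoin_append (sep : List Char) (as bs : List (List Char)) (ha : as ≠ []) (hb : bs ≠ []) :
    PySem.Chars.join sep (as ++ bs) = PySem.Chars.join sep as ++ sep ++ PySem.Chars.join sep bs := by
  induction as with
  | nil => exact absurd rfl ha
  | cons a as' ih =>
    cases as' with
    | nil =>
      cases bs with
      | nil => exact absurd rfl hb
      | cons b bs' => simp [PySem.Chars.join_cons_cons, PySem.Chars.join_singleton]
    | cons a2 as'' =>
      have hstep := ih (by simp)
      simp only [List.cons_append] at hstep ⊢
      rw [PySem.Chars.join_cons_cons, hstep, PySem.Chars.join_cons_cons]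
      simp [List.append_assoc]

theorem pvJoin_cons (sep x : List Char) (ys : List (List Char)) (hy : ys ≠ []) :
    PySem.Chars.join sep (x :: ys) = x ++ sep ++ PySem.Chars.join sep ys := by
  have := pvJoin_append sep [x] ys (by simp) hy
  simpa [PySem.Chars.join_singleton] using this

-- the key join identity: A's flat out-list joined by "\n" equals per-block join glued by "\n\n\n"
theorem pvJoinJ (D : List (List (List Char))) (C : List (List Char))
    (hD : ∀ b ∈ D, ∃ l ∈ b, l ≠ []) (hC : D ≠ [] → C ≠ []) :
    PySem.Chars.join ['\n'] (pvGlue D ++ C) =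
      PySem.Chars.join ['\n', '\n', '\n']
        (D.map (fun b => PySem.Chars.join ['\n'] (pvTrimB b)) ++
          [PySem.Chars.join ['\n'] C]) := by
  induction D with
  | nil => simp [pvGlue, PySem.Chars.join_singleton]
  | cons d ds ih =>
    have hCne : C ≠ [] := hC (by simp)
    have hZ : pvGlue ds ++ C ≠ [] := by
      cases hz : pvGlue ds with
      | nil => simpa using hCne
      | cons z zs => simp
    have htd : pvTrimB d ≠ [] := pvTrim_ne_nil d (hD d (by simp))
    have ihz := ih (fun b hb => hD b (by simp [hb])) (fun _ => hCne)
    have hglue : pvGlue (d :: ds) ++ C =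
        pvTrimB d ++ ([] :: [] :: (pvGlue ds ++ C)) := by
      simp [pvGlue, List.append_assoc]
    rw [hglue, pvJoin_append ['\n'] _ _ htd (by simp)]
    obtain ⟨z, zs, hzz⟩ : ∃ z zs, pvGlue ds ++ C = z :: zs := by
      cases h : pvGlue ds ++ C with
      | nil => exact absurd h hZ
      | cons z zs => exact ⟨z, zs, rfl⟩
    rw [hzz, PySem.Chars.join_cons_cons, PySem.Chars.join_cons_cons, ← hzz, ihz]
    have : (d :: ds).map (fun b => PySem.Chars.join ['\n'] (pvTrimB b)) ++
        [PySem.Chars.join ['\n'] C] =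
        PySem.Chars.join ['\n'] (pvTrimB d) ::
          (ds.map (fun b => PySem.Chars.join ['\n'] (pvTrimB b)) ++
            [PySem.Chars.join ['\n'] C]) := by simp
    rw [this]
    obtain ⟨y, ys, hyy⟩ : ∃ y ys,
        ds.map (fun b => PySem.Chars.join ['\n'] (pvTrimB b)) ++
          [PySem.Chars.join ['\n'] C] = y :: ys := by
      cases h : ds.map (fun b => PySem.Chars.join ['\n'] (pvTrimB b)) ++
          [PySem.Chars.join ['\n'] C] with
      | nil => simp at h
      | cons y ys => exact ⟨y, ys, rfl⟩
    rw [hyy, PySem.Chars.join_cons_cons, ← hyy]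
    simp [List.append_assoc]

-- simulation invariant: A's fold state = (pvGlue done ++ cur, prev) for the pipeline fold state
theorem pvSim (lines : List (List Char)) :
    ∀ (done : List (List (List Char))) (cur : List (List Char)) (prev : Option String),
    (prev.isSome = true → ∃ l ∈ cur, l ≠ []) →
    (∀ b ∈ done, ∃ l ∈ b, l ≠ []) →
    (done ≠ [] → prev.isSome = true) →
    lines.foldl pvStepA (pvGlue done ++ cur, prev) =
      (pvGlue (lines.foldl pvStepB (done, cur, prev)).1 ++
        (lines.foldl pvStepB (done, cur, prev)).2.1,
       (lines.foldl pvStepB (done, cur, prev)).2.2) ∧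
    ((lines.foldl pvStepB (done, cur, prev)).2.2.isSome = true →
        ∃ l ∈ (lines.foldl pvStepB (done, cur, prev)).2.1, l ≠ []) ∧
    (∀ b ∈ (lines.foldl pvStepB (done, cur, prev)).1, ∃ l ∈ b, l ≠ []) ∧
    ((lines.foldl pvStepB (done, cur, prev)).1 ≠ [] →
        (lines.foldl pvStepB (done, cur, prev)).2.2.isSome = true) := by
  induction lines with
  | nil =>
    intro done cur prev h1 h2 h3
    exact ⟨rfl, h1, h2, h3⟩
  | cons line ls ih =>
    intro done cur prev h1 h2 h3
    rw [List.foldl_cons, List.foldl_cons, pvStepA_def, pvStepB_def]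
    by_cases hc : ((pvSpk line).isSome && prev.isSome && (pvSpk line != prev)) = true
    · have hspk : (pvSpk line).isSome = true := by
        simp only [Bool.and_eq_true] at hc; exact hc.1.1
      have hprev : prev.isSome = true := by
        simp only [Bool.and_eq_true] at hc; exact hc.1.2
      have hline : line ≠ [] := pvSpk_line_ne_nil line hspk
      rw [if_pos hc, if_pos hc, if_pos hspk]
      have hpop : pvPopTrailingEmpty (pvGlue done ++ cur) ++ [[], []] ++ [line] =
          pvGlue (done ++ [cur]) ++ [line] := by
        rw [pvPop_append (pvGlue done) cur (h1 hprev), pvGlue_append_singleton]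
        simp [List.append_assoc]
      rw [hpop]
      exact ih (done ++ [cur]) [line] (pvSpk line)
        (fun _ => ⟨line, by simp, hline⟩)
        (fun b hb => by
          rcases List.mem_append.mp hb with h | h
          · exact h2 b h
          · simp at h; subst h; exact h1 hprev)
        (fun _ => hspk)
    · rw [if_neg hc, if_neg hc, List.append_assoc]
      exact ih done (cur ++ [line]) (if (pvSpk line).isSome then pvSpk line else prev)
        (fun hp => by
          by_cases hs : (pvSpk line).isSome = true
          · exact ⟨line, by simp, pvSpk_line_ne_nil line hs⟩
          · rw [if_neg hs] at hp
            obtain ⟨l, hl, hne⟩ := h1 hp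
            exact ⟨l, by simp [hl], hne⟩)
        h2
        (fun hd => by
          by_cases hs : (pvSpk line).isSome = true
          · simp [hs]
          · rw [if_neg hs]; exact h3 hd)

-- the pipeline fold only ever appends to the done-list
theorem pvStepB_done_prefix (r : List (List Char)) :
    ∀ (done : List (List (List Char))) (cur : List (List Char)) (prev : Option String),
    r.foldl pvStepB (done, cur, prev) =
      (done ++ (r.foldl pvStepB ([], cur, prev)).1,
       (r.foldl pvStepB ([], cur, prev)).2) := by
  induction r with
  | nil => intro done cur prev; simp
  | cons line ls ih =>
    intro done cur prev
    rw [List.foldl_cons, List.foldl_cons, pvStepB_def, pvStepB_def]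
    by_cases hc : ((pvSpk line).isSome && prev.isSome && (pvSpk line != prev)) = true
    · rw [if_pos hc, if_pos hc, ih (done ++ [cur]), ih ([] ++ [cur])]
      simp [List.append_assoc]
    · rw [if_neg hc, if_neg hc]
      exact ih done (cur ++ [line]) _

-- one block of the pipeline fold = _first_block, with a fresh none-restart after the boundary
theorem pvSB (lines : List (List Char)) :
    ∀ (prev : Option String) (cur : List (List Char)) (done : List (List (List Char))),
    ((pvFirstBlock prev lines).2 = [] →
      (lines.foldl pvStepB (done, cur, prev)).1 = done ∧
      (lines.foldl pvStepB (done, cur, prev)).2.1 = cur ++ (pvFirstBlock prev lines).1) ∧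
    ((pvFirstBlock prev lines).2 ≠ [] →
      lines.foldl pvStepB (done, cur, prev) =
        (pvFirstBlock prev lines).2.foldl pvStepB
          (done ++ [cur ++ (pvFirstBlock prev lines).1], [], none)) := by
  induction lines with
  | nil =>
    intro prev cur done
    exact ⟨fun _ => ⟨rfl, by simp [pvFirstBlock]⟩, fun h => absurd rfl h⟩
  | cons line ls ih =>
    intro prev cur done
    rw [List.foldl_cons, pvStepB_def]
    simp only [pvFirstBlock]
    rw [← pvSpk_eq_speakerB]
    cases hsp : pvSpk line with
    | none =>
      simp only [Option.isSome_none, Bool.false_and, if_neg (by simp : ¬ (false = true))]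
      have := ih prev (cur ++ [line]) done
      simp only [List.append_assoc, List.cons_append, List.nil_append] at this ⊢
      exact this
    | some sp =>
      simp only [Option.isSome_some, Bool.true_and]
      by_cases hc : (prev.isSome && ((some sp : Option String) != prev)) = true
      · -- boundary: the fold starts a fresh block; first_block breaks here
        rw [if_pos hc, if_pos hc]
        constructor
        · intro h; exact absurd h (by simp)
        · intro _
          -- fold over (line :: ls) from ([],none) first consumes line without a boundary
          have hfresh : (line :: ls).foldl pvStepB (done ++ [cur ++ []], [], none) =
              ls.foldl pvStepB (done ++ [cur], [line], some sp) := by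
            rw [List.foldl_cons, pvStepB_def, hsp]
            simp
          rw [hfresh]
      · rw [if_neg hc, if_neg hc]
        have := ih (some sp) (cur ++ [line]) done
        simp only [List.append_assoc, List.cons_append, List.nil_append] at this ⊢
        exact this

-- pvRender computes exactly the pipeline's trim-and-join of the block partition
theorem pvREN : ∀ (n : Nat) (lines : List (List Char)), lines.length ≤ n →
    PySem.Chars.join ['\n', '\n', '\n']
      (((lines.foldl pvStepB ([], [], none)).1.map pvTrimB ++
          [(lines.foldl pvStepB ([], [], none)).2.1]).map (PySem.Chars.join ['\n'])) =
    pvRender lines := by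
  intro n
  induction n with
  | zero =>
    intro lines hlen
    have : lines = [] := List.eq_nil_of_length_eq_zero (Nat.le_zero.mp hlen)
    subst this
    simp [pvRender, PySem.Chars.join_singleton]
  | succ n ih =>
    intro lines hlen
    cases lines with
    | nil => simp [pvRender, PySem.Chars.join_singleton]
    | cons line ls =>
      obtain ⟨hempty, hrest⟩ := pvSB (line :: ls) none [] []
      by_cases hr : (pvFirstBlock none (line :: ls)).2 = []
      · obtain ⟨h1, h2⟩ := hempty hr
        rw [h1, h2]
        rw [pvRender]
        rw [if_pos (List.isEmpty_iff.mpr hr)]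
        simp [PySem.Chars.join_singleton]
      · have hfold := hrest hr
        rw [hfold, pvStepB_done_prefix]
        set G := (pvFirstBlock none (line :: ls)).2.foldl pvStepB ([], [], none) with hG
        rw [pvRender, if_neg (by simpa [List.isEmpty_iff] using hr)]
        have hlt : (pvFirstBlock none (line :: ls)).2.length ≤ n := by
          have := pvFirstBlock_rest_lt line ls
          simp only [List.length_cons] at this hlen
          omega
        rw [← ih (pvFirstBlock none (line :: ls)).2 hlt, ← hG]
        simp only [List.nil_append, List.map_append, List.map_cons, List.map_nil,
          List.cons_append]
        rw [pvJoin_cons ['\n','\n','\n'] _ _ (by simp)]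

-- chain: A's joined out-list = pvRender of the same lines
theorem pvCore_eq (lines : List (List Char)) :
    PySem.Chars.join ['\n'] ((lines.foldl pvStepA ([], none)).1) = pvRender lines := by
  obtain ⟨hfold, hinv1, hinv2, hinv3⟩ := pvSim lines [] [] none (by simp) (by simp) (by simp)
  have hinit : (pvGlue [] ++ [] : List (List Char)) = [] := by simp [pvGlue]
  rw [hinit] at hfold
  rw [hfold]
  have hC : (lines.foldl pvStepB ([], [], none)).1 ≠ [] →
      (lines.foldl pvStepB ([], [], none)).2.1 ≠ [] := by
    intro hd
    obtain ⟨l, hl, _⟩ := hinv1 (hinv3 hd)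
    exact List.ne_nil_of_mem hl
  rw [pvJoinJ _ _ hinv2 hC]
  rw [← pvREN lines.length lines (le_refl _)]
  simp [List.map_map, Function.comp_def]

-- A's env wrapping (a join) written as B's env wrapping (a concatenation)
theorem pvWrap_eq (env X : List Char) :
    PySem.Chars.join ['\n']
      [("environment context:".toList), env, [], [], ("transcript:".toList), X] =
    ("environment context:\n".toList) ++ env ++ ("\n\n\ntranscript:\n".toList) ++ X := by
  have h1 : ("environment context:\n".toList : List Char) =
      "environment context:".toList ++ ['\n'] := by decide
  have h2 : ("\n\n\ntranscript:\n".toList : List Char) =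
      ['\n'] ++ ['\n'] ++ ['\n'] ++ "transcript:".toList ++ ['\n'] := by decide
  rw [h1, h2, PySem.Chars.join_cons_cons, PySem.Chars.join_cons_cons,
    PySem.Chars.join_cons_cons, PySem.Chars.join_cons_cons, PySem.Chars.join_cons_cons,
    PySem.Chars.join_singleton]
  simp [List.append_assoc]

-- ===== VERDICT (by name: the statement is the Claim_ definition above) =====
theorem format_transcript_text_spec : Claim_equal_format_transcript_text := by
  intro raw _
  unfold Spec_format_transcript_text format_transcript_text format_transcript_text_alt
  simp only []
  by_cases hE : PySem.Chars.find raw.toList ("</environment_context>".toList) = -1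
  · have e1 : (PySem.Chars.find raw.toList ("</environment_context>".toList) ≠ -1) = False := by
      simp only [ne_eq, hE, not_true_eq_false]
    have e2 : (PySem.Chars.find raw.toList ("</environment_context>".toList) == -1) = true := by
      simp only [beq_iff_eq]; exact hE
    simp only [e1, e2, if_false, if_true]
    rw [pvCore_eq]
    simp
  · have e1 : (PySem.Chars.find raw.toList ("</environment_context>".toList) ≠ -1) = True :=
      eq_true hE
    have e2 : (PySem.Chars.find raw.toList ("</environment_context>".toList) == -1) = false := by
      simp only [beq_eq_false_iff_ne, ne_eq]; exact hE
    simp only [e1, e2, if_true, Bool.false_eq_true, if_false]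
    rw [pvCore_eq]
    by_cases hB : PySem.Chars.strip (PySem.Chars.slice raw.toList none
        (some (PySem.Chars.find raw.toList ("</environment_context>".toList) + 22))) = []
    · rw [hB]
      simp
    · rw [if_pos hB, if_pos hB, pvWrap_eq]
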